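-- pv_equiv track=rewrite | github.com/mhraza95/100-days-of-coding | day-11.py | largets_sum
-- ===== SOURCE A (Python) =====
-- def largets_sum(l: list) -> int:
--
--     # This problem was asked by Airbnb.
--
--     # Given a list of integers, write a function that returns the largest sum of non-adjacent numbers. Numbers can be 0 or negative.
--
--     # For example, [2, 4, 6, 2, 5] should return 13, since we pick 2, 6, and 5. [5, 1, 1, 5] should return 10, since we pick 5 and 5.
--
--     n = len(l)
--
--     even_sum = 0
--
--     odd_sum = 0
--
--     third_sum = 0
--
--     for i in range(0, n, 2):
--
--         even_sum += l[i]
--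
--     for j in range(1, n, 2):
--
--         odd_sum += l[j]
--
--     for k in range(0, n, 3):
--
--         third_sum += l[k]
--
--     return max(even_sum, odd_sum, third_sum)
-- ===== SOURCE B (Python) =====
-- def largets_sum(l: list) -> int:
--     # single pass: classify each index by modulus instead of three strided loops
--     even_sum = 0
--     odd_sum = 0
--     third_sum = 0
--     for i, x in enumerate(l):
--         if i % 2 == 0:
--             even_sum += x
--         else:
--             odd_sum += x
--         if i % 3 == 0:
--             third_sum += x
--     return max(even_sum, odd_sum, third_sum)
-- ===== Notes on version B (the rewrite author's own statement) =====
-- stated objective: simpler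
-- what changed: Replaced A's three independent strided index loops (range(0,n,2), range(1,n,2), range(0,n,3)) by a single enumerate pass that routes each element into the even/odd/every-third accumulators by index-modulo tests.
import Mathlib
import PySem

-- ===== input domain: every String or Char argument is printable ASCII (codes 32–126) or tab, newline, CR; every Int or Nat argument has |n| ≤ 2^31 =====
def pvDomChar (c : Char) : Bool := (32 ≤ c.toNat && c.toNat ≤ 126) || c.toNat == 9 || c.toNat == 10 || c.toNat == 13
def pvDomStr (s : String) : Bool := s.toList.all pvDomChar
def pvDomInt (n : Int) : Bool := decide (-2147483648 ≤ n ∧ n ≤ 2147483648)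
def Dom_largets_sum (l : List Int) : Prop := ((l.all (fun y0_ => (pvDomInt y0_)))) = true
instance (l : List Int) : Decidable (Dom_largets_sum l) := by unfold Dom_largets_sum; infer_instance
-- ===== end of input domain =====

-- B replaces A's three strided index loops by one enumerate pass with index-modulo branches (simpler; same O(n) cost).

-- ===== PORT A =====
-- three strided index loops with l[i] (indices drawn from range are always in bounds, so pyGetD is exact here)
def largets_sum (l : List Int) : Int :=
  let n : Int := (l.length : Int)
  let even_sum := (PySem.List.pyRange 0 n 2).foldl (fun acc i => acc + PySem.List.pyGetD l i 0) 0
  let odd_sum := (PySem.List.pyRange 1 n 2).foldl (fun acc j => acc + PySem.List.pyGetD l j 0) 0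
  let third_sum := (PySem.List.pyRange 0 n 3).foldl (fun acc k => acc + PySem.List.pyGetD l k 0) 0
  max even_sum (max odd_sum third_sum)

-- ===== PORT B =====
-- loop body of B: route x into the accumulators according to i % 2 and i % 3
def pvStep (acc : Int × Int × Int) (p : Int × Int) : Int × Int × Int :=
  let e := if PySem.Int.mod p.1 2 = 0 then acc.1 + p.2 else acc.1
  let o := if PySem.Int.mod p.1 2 = 0 then acc.2.1 else acc.2.1 + p.2
  let t := if PySem.Int.mod p.1 3 = 0 then acc.2.2 + p.2 else acc.2.2
  (e, o, t)

def largets_sum_alt (l : List Int) : Int :=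
  let r := (PySem.List.enumerate l 0).foldl pvStep (0, 0, 0)
  max r.1 (max r.2.1 r.2.2)

-- ===== PRECONDITION & SPEC =====
def Spec_largets_sum (l : List Int) (out : Int) : Prop := out = largets_sum_alt l
instance (l : List Int) (out : Int) : Decidable (Spec_largets_sum l out) := by unfold Spec_largets_sum; infer_instance

-- ===== CLAIM (what is proved, stated in full; the proofs are below) =====
def Claim_equal_largets_sum : Prop := ∀ (l : List Int), Dom_largets_sum l → Spec_largets_sum l (largets_sum l)

-- ===== LEMMAS AND PROOFS =====

-- sum of the elements of l at indices a, a+s, a+2s, …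
def pvF (a s : Nat) (l : List Int) : Int :=
  ((PySem.List.pyRange (a : Int) (l.length : Int) s).map (fun j => PySem.List.pyGetD l j 0)).sum

lemma pvRange_succ (a s n : Nat) (hs : 0 < s) (ha : a ≤ n) :
    PySem.List.pyRange (a : Int) ((n : Int) + 1) (s : Int) =
      PySem.List.pyRange (a : Int) (n : Int) (s : Int) ++
        (if (n - a) % s = 0 then [(n : Int)] else []) := by
  have hsz : (0 : Int) < (s : Int) := by exact_mod_cast hs
  rw [PySem.List.pyRange_of_pos _ _ hsz, PySem.List.pyRange_of_pos _ _ hsz]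
  have hlt1 : (a : Int) < (n : Int) + 1 := by omega
  rw [if_pos hlt1]
  have hnum1 : ((n : Int) + 1 - a + s - 1) = ((n - a + s : Nat) : Int) := by push_cast; omega
  rw [hnum1]
  have hdiv1 : (((n - a + s : Nat) : Int) / (s : Int)).toNat = (n - a + s) / s := by
    rw [← Int.natCast_div]; exact Int.toNat_natCast _
  rw [hdiv1]
  rcases Nat.eq_zero_or_pos (n - a) with hm0 | hmpos
  · -- a = n : the old range is empty, the new one is [a]
    have han : a = n := by omega
    subst han
    rw [if_neg (by omega : ¬ (a : Int) < (a : Int))]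
    simp only [hm0, Nat.zero_add, Nat.div_self hs, Nat.zero_mod]
    simp [List.range_succ]
  · have han : (a : Int) < (n : Int) := by omega
    rw [if_pos han]
    have hnum2 : ((n : Int) - a + s - 1) = ((n - a - 1 + s : Nat) : Int) := by push_cast; omega
    rw [hnum2]
    have hdiv2 : (((n - a - 1 + s : Nat) : Int) / (s : Int)).toNat = (n - a - 1 + s) / s := by
      rw [← Int.natCast_div]; exact Int.toNat_natCast _
    rw [hdiv2]
    have hc1 : (n - a + s) / s = (n - a) / s + 1 := Nat.add_div_right _ hs
    rcases Nat.eq_zero_or_pos ((n - a) % s) with hr0 | hrpos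
    · -- s divides n - a : one extra element, and it is n itself
      obtain ⟨q, hq⟩ := Nat.dvd_of_mod_eq_zero hr0
      have hqe : (n - a) / s = q := by rw [hq]; exact Nat.mul_div_cancel_left _ hs
      rw [hqe] at hc1
      have hc2 : (n - a - 1 + s) / s = q := by
        rw [(show n - a - 1 + s = s * q + (s - 1) by rw [← hq]; omega),
            Nat.mul_add_div hs, Nat.div_eq_of_lt (show s - 1 < s by omega)]
        omega
      rw [hc1, hc2, if_pos hr0, List.range_succ, List.map_append]
      congr 1
      simp only [List.map_cons, List.map_nil]
      congr 1
      have hn : a + s * q = n := by rw [← hq]; omega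
      exact_mod_cast hn
    · -- s does not divide n - a : the two ranges have the same length
      have hqr := Nat.div_add_mod (n - a) s
      have hr : (n - a) % s < s := Nat.mod_lt _ hs
      have hc2 : (n - a - 1 + s) / s = (n - a) / s + 1 := by
        have key : n - a - 1 + s = s * ((n - a) / s) + ((n - a) % s - 1) + s := by
          generalize hP : s * ((n - a) / s) = P at hqr ⊢
          omega
        rw [key, Nat.add_div_right _ hs, Nat.mul_add_div hs,
            Nat.div_eq_of_lt (show (n - a) % s - 1 < s by omega)]
      rw [hc1, hc2, if_neg (by omega : ¬ (n - a) % s = 0), List.append_nil]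

lemma pvEnum_append {α : Type} (l : List α) (x : α) (s : Int) :
    PySem.List.enumerate (l ++ [x]) s = PySem.List.enumerate l s ++ [((s + l.length : Int), x)] := by
  induction l generalizing s with
  | nil => simp [PySem.List.enumerate, PySem.List.enumerate_cons]
  | cons y ys ih =>
      rw [List.cons_append, PySem.List.enumerate_cons, PySem.List.enumerate_cons, ih]
      simp; ring_nf

lemma pvGetD_append_lt (l : List Int) (x : Int) (j : Int) (h0 : 0 ≤ j) (h1 : j < l.length) :
    PySem.List.pyGetD (l ++ [x]) j 0 = PySem.List.pyGetD l j 0 := by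
  obtain ⟨k, rfl⟩ : ∃ k : Nat, j = (k : Int) := ⟨j.toNat, by omega⟩
  have hk : k < l.length := by exact_mod_cast h1
  rw [PySem.List.pyGetD_natCast, PySem.List.pyGetD_natCast]
  simp [List.getD, List.getElem?_append_left hk]

lemma pvF_append (a s : Nat) (hs : 0 < s) (l : List Int) (x : Int) (ha : a ≤ l.length) :
    pvF a s (l ++ [x]) = pvF a s l + (if (l.length - a) % s = 0 then x else 0) := by
  unfold pvF
  have hlen : ((l ++ [x]).length : Int) = (l.length : Int) + 1 := by simp
  rw [hlen, pvRange_succ a s l.length hs ha, List.map_append, List.sum_append]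
  have hmapeq :
      (PySem.List.pyRange (a : Int) (l.length : Int) s).map (fun j => PySem.List.pyGetD (l ++ [x]) j 0)
        = (PySem.List.pyRange (a : Int) (l.length : Int) s).map (fun j => PySem.List.pyGetD l j 0) := by
    apply List.map_congr_left
    intro j hj
    have hmem := (PySem.List.mem_pyRange_iff_of_pos (a := a) (b := l.length) (s := s)
      (by exact_mod_cast hs) j).mp hj
    exact pvGetD_append_lt l x j (by omega) (by omega)
  rw [hmapeq]
  split_ifs with h
  · simp
  · simp

lemma pvKey (l : List Int) :
    (PySem.List.enumerate l 0).foldl pvStep (0, 0, 0) = (pvF 0 2 l, pvF 1 2 l, pvF 0 3 l) := by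
  induction l using List.reverseRecOn with
  | nil => decide
  | append_singleton l x ih =>
      rw [pvEnum_append, List.foldl_append, ih]
      simp only [List.foldl_cons, List.foldl_nil]
      rcases Nat.eq_zero_or_pos l.length with h0 | hpos
      · have hnil : l = [] := List.eq_nil_of_length_eq_zero h0
        subst hnil
        simp [pvStep, pvF, PySem.List.pyRange, PySem.List.pyGetD, PySem.Int.mod]
      · rw [pvF_append 0 2 (by norm_num) l x (Nat.zero_le _),
            pvF_append 1 2 (by norm_num) l x hpos,
            pvF_append 0 3 (by norm_num) l x (Nat.zero_le _)]
        have hm2 : PySem.Int.mod ((0 : Int) + (l.length : Int)) 2 = ((l.length % 2 : Nat) : Int) := by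
          rw [zero_add]; exact_mod_cast PySem.Int.mod_natCast l.length 2
        have hm3 : PySem.Int.mod ((0 : Int) + (l.length : Int)) 3 = ((l.length % 3 : Nat) : Int) := by
          rw [zero_add]; exact_mod_cast PySem.Int.mod_natCast l.length 3
        unfold pvStep
        have h2 : (((l.length % 2 : Nat) : Int) = 0) ↔ (l.length % 2 = 0) := by exact_mod_cast Iff.rfl
        have h3 : (((l.length % 3 : Nat) : Int) = 0) ↔ (l.length % 3 = 0) := by exact_mod_cast Iff.rfl
        simp only [hm2, hm3, h2, h3]
        refine Prod.ext ?_ (Prod.ext ?_ ?_) <;> simp only [] <;> split_ifs <;>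
          first
            | (exfalso; omega)
            | simp

-- ===== VERDICT (by name: the statement is the Claim_ definition above) =====
theorem largets_sum_spec : Claim_equal_largets_sum := by
  intro l _
  unfold Spec_largets_sum largets_sum largets_sum_alt
  rw [pvKey]
  simp only [PySem.List.foldl_add]
  simp [pvF]
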